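-- pv_equiv track=rewrite | github.com/artacone/yandex_algo_train2 | 6/D.py | count_days_to_work
-- ===== SOURCE A (Python) =====
-- def count_trees_timbered(timber1_prod, timber1_dayoff, timber2_prod, timber2_dayoff, days):
--
--     return timber1_prod * (days - days // timber1_dayoff) + timber2_prod * (days - days // timber2_dayoff)
--
-- def count_days_to_work(timber1_prod, timber1_dayoff, timber2_prod, timber2_dayoff, num_trees):
--     left = 0
--     right = 2 * num_trees
--     while left < right:
--         middle = (left + right) // 2
--         if count_trees_timbered(timber1_prod, timber1_dayoff, timber2_prod, timber2_dayoff, middle) >= num_trees: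
--             right = middle
--         else:
--             left = middle + 1
--     return left
-- ===== SOURCE B (Python) =====
-- def count_days_to_work(timber1_prod, timber1_dayoff, timber2_prod, timber2_dayoff, num_trees):
--     if num_trees <= 0:
--         return 0
--     for day in range(2 * num_trees):
--         if (timber1_prod * (day - day // timber1_dayoff)
--                 + timber2_prod * (day - day // timber2_dayoff)) >= num_trees:
--             return day
--     return 2 * num_trees
-- ===== Notes on version B (the rewrite author's own statement) =====
-- stated objective: simpler
-- what changed: Replaced the (left,right) binary search by a single forward linear scan: after a num_trees <= 0 guard, iterate day upward from 0 and return the first day whose timbered count reaches the target, falling back to 2*num_trees.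
-- outside the precondition, e.g. on count_days_to_work(4, -3, -7, 3, 21): A returns 36, B returns 31; on count_days_to_work(1, 0, 1, 1, 5): A raises ZeroDivisionError, B raises ZeroDivisionError
import Mathlib
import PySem

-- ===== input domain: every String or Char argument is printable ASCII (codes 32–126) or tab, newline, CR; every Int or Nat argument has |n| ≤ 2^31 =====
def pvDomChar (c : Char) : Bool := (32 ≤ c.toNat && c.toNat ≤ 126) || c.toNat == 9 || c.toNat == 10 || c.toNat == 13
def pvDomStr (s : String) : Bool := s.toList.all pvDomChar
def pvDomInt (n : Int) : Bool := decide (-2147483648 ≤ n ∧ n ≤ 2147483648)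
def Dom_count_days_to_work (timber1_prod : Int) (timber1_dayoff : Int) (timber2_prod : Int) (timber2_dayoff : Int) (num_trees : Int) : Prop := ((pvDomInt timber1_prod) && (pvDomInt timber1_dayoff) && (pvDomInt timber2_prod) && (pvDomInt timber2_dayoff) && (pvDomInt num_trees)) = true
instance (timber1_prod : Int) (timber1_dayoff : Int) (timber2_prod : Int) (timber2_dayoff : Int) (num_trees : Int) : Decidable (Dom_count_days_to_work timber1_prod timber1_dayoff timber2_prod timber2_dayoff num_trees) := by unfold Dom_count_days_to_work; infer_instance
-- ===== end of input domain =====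

-- B replaces A's binary search by a guarded forward linear scan over day counts
-- (a simpler first-hit loop of higher asymptotic cost; return values proved equal on Pre_).

-- ===== PORT A =====
def count_trees_timbered (timber1_prod : Int) (timber1_dayoff : Int) (timber2_prod : Int) (timber2_dayoff : Int) (days : Int) : Int :=
  timber1_prod * (days - PySem.Int.floordiv days timber1_dayoff)
    + timber2_prod * (days - PySem.Int.floordiv days timber2_dayoff)

-- the while-loop of A, with its state (left, right), as well-founded recursion on right - left
def pvBsearch (timber1_prod : Int) (timber1_dayoff : Int) (timber2_prod : Int) (timber2_dayoff : Int) (num_trees : Int) (left : Int) (right : Int) : Int :=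
  if h : left < right then
    let middle := PySem.Int.floordiv (left + right) 2
    if count_trees_timbered timber1_prod timber1_dayoff timber2_prod timber2_dayoff middle ≥ num_trees then
      pvBsearch timber1_prod timber1_dayoff timber2_prod timber2_dayoff num_trees left middle
    else
      pvBsearch timber1_prod timber1_dayoff timber2_prod timber2_dayoff num_trees (middle + 1) right
  else left
termination_by (right - left).toNat
decreasing_by
  · have hlt : PySem.Int.floordiv (left + right) 2 < right := by
      rw [PySem.Int.floordiv_lt_iff_lt_mul (by omega : (0:Int) < 2)]; omega
    simp only [middle] at *; omega
  · have hb := PySem.Int.floordiv_two_mid_bounds (le_of_lt h) (lo := left) (hi := right)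
    simp only [middle] at *; omega

def count_days_to_work (timber1_prod : Int) (timber1_dayoff : Int) (timber2_prod : Int) (timber2_dayoff : Int) (num_trees : Int) : Int :=
  pvBsearch timber1_prod timber1_dayoff timber2_prod timber2_dayoff num_trees 0 (2 * num_trees)

-- ===== PORT B =====
-- the for-loop of B: fuel counts the days still to try; 'day' is range's loop variable,
-- and when the range is exhausted day = 2 * num_trees, the fallback value
def pvScan (timber1_prod : Int) (timber1_dayoff : Int) (timber2_prod : Int) (timber2_dayoff : Int) (num_trees : Int) (day : Int) : Nat → Int
  | 0 => day
  | f + 1 =>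
    if timber1_prod * (day - PySem.Int.floordiv day timber1_dayoff)
        + timber2_prod * (day - PySem.Int.floordiv day timber2_dayoff) ≥ num_trees then
      day
    else
      pvScan timber1_prod timber1_dayoff timber2_prod timber2_dayoff num_trees (day + 1) f

def count_days_to_work_alt (timber1_prod : Int) (timber1_dayoff : Int) (timber2_prod : Int) (timber2_dayoff : Int) (num_trees : Int) : Int :=
  if num_trees ≤ 0 then 0
  else pvScan timber1_prod timber1_dayoff timber2_prod timber2_dayoff num_trees 0 (2 * num_trees).toNat

-- ===== PRECONDITION & SPEC =====
-- Pre_ excludes the inputs (reachable only when num_trees > 0) with a zero day-off period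
-- (A raises ZeroDivisionError) or production rates of mixed sign: there the timbered count is
-- not monotone in the day, so A's bisection result is path-dependent — an accident of the pivot
-- sequence, not a specified value — and the natural first-hit scan legitimately differs.
def Pre_count_days_to_work (timber1_prod : Int) (timber1_dayoff : Int) (timber2_prod : Int) (timber2_dayoff : Int) (num_trees : Int) : Prop :=
  num_trees ≤ 0 ∨ (timber1_dayoff ≠ 0 ∧ timber2_dayoff ≠ 0 ∧
    ((0 ≤ timber1_prod ∧ 0 ≤ timber2_prod) ∨ (timber1_prod ≤ 0 ∧ timber2_prod ≤ 0)))
instance (timber1_prod : Int) (timber1_dayoff : Int) (timber2_prod : Int) (timber2_dayoff : Int) (num_trees : Int) : Decidable (Pre_count_days_to_work timber1_prod timber1_dayoff timber2_prod timber2_dayoff num_trees) := by unfold Pre_count_days_to_work; infer_instance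

def pvWitness_count_days_to_work : Int × Int × Int × Int × Int := (3, 2, 3, 3, 10)

def Spec_count_days_to_work (timber1_prod : Int) (timber1_dayoff : Int) (timber2_prod : Int) (timber2_dayoff : Int) (num_trees : Int) (out : Int) : Prop := out = count_days_to_work_alt timber1_prod timber1_dayoff timber2_prod timber2_dayoff num_trees
instance (timber1_prod : Int) (timber1_dayoff : Int) (timber2_prod : Int) (timber2_dayoff : Int) (num_trees : Int) (out : Int) : Decidable (Spec_count_days_to_work timber1_prod timber1_dayoff timber2_prod timber2_dayoff num_trees out) := by unfold Spec_count_days_to_work; infer_instance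

-- ===== CLAIM (what is proved, stated in full; the proofs are below) =====
def Claim_equal_count_days_to_work : Prop := ∀ (timber1_prod : Int) (timber1_dayoff : Int) (timber2_prod : Int) (timber2_dayoff : Int) (num_trees : Int), Dom_count_days_to_work timber1_prod timber1_dayoff timber2_prod timber2_dayoff num_trees → Pre_count_days_to_work timber1_prod timber1_dayoff timber2_prod timber2_dayoff num_trees → Spec_count_days_to_work timber1_prod timber1_dayoff timber2_prod timber2_dayoff num_trees (count_days_to_work timber1_prod timber1_dayoff timber2_prod timber2_dayoff num_trees)

-- ===== LEMMAS AND PROOFS =====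

-- floor division advances by at most 1 when the dividend advances by 1 (any nonzero divisor)
lemma pv_floordiv_succ_le (d o : Int) (ho : o ≠ 0) :
    PySem.Int.floordiv (d + 1) o ≤ PySem.Int.floordiv d o + 1 := by
  have h1 := PySem.Int.floordiv_mul_add_mod d o
  have h2 := PySem.Int.floordiv_mul_add_mod (d + 1) o
  rcases lt_or_gt_of_ne ho with hneg | hpos
  · have r1 := PySem.Int.mod_neg_bounds (a := d) hneg
    have r2 := PySem.Int.mod_neg_bounds (a := d + 1) hneg
    by_contra hc
    push Not at hc
    have : (PySem.Int.floordiv d o + 2) ≤ PySem.Int.floordiv (d + 1) o := by omega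
    nlinarith [mul_le_mul_of_nonpos_right this (le_of_lt hneg)]
  · have r1n := PySem.Int.mod_nonneg (a := d) hpos
    have r1l := PySem.Int.mod_lt (a := d) hpos
    have r2n := PySem.Int.mod_nonneg (a := d + 1) hpos
    have r2l := PySem.Int.mod_lt (a := d + 1) hpos
    by_contra hc
    push Not at hc
    have : (PySem.Int.floordiv d o + 2) ≤ PySem.Int.floordiv (d + 1) o := by omega
    nlinarith [mul_le_mul_of_nonneg_right this (le_of_lt hpos)]

-- d - d // o is monotone in d (any nonzero divisor)
lemma pv_work_mono (o d d' : Int) (ho : o ≠ 0) (h : d ≤ d') :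
    d - PySem.Int.floordiv d o ≤ d' - PySem.Int.floordiv d' o := by
  have key : ∀ (k : Nat) (a : Int),
      a - PySem.Int.floordiv a o ≤ (a + k) - PySem.Int.floordiv (a + k) o := by
    intro k
    induction k with
    | zero => intro a; simp
    | succ k ih =>
        intro a
        have h1 := ih (a + 1)
        have h2 := pv_floordiv_succ_le a o ho
        have : a + 1 + (k : Int) = a + ((k : Nat) + 1 : Nat) := by push_cast; ring
        rw [this] at h1
        omega
  have := key (d' - d).toNat d
  have hcast : d + ((d' - d).toNat : Int) = d' := by omega
  rw [hcast] at this
  exact this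

-- d - d // o is nonnegative for a nonnegative day (any nonzero divisor)
lemma pv_work_nonneg (o e : Int) (ho : o ≠ 0) (he : 0 ≤ e) :
    0 ≤ e - PySem.Int.floordiv e o := by
  have h1 := PySem.Int.floordiv_mul_add_mod e o
  rcases lt_or_gt_of_ne ho with hneg | hpos
  · have hr := PySem.Int.mod_neg_bounds (a := e) hneg
    by_contra hc
    push Not at hc
    have hq : 1 ≤ PySem.Int.floordiv e o := by omega
    nlinarith [mul_le_mul_of_nonpos_right hq (le_of_lt hneg)]
  · have hrn := PySem.Int.mod_nonneg (a := e) hpos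
    have hrl := PySem.Int.mod_lt (a := e) hpos
    by_contra hc
    push Not at hc
    have hq : e + 1 ≤ PySem.Int.floordiv e o := by omega
    nlinarith [mul_le_mul_of_nonneg_right hq (le_of_lt hpos),
      mul_le_mul_of_nonneg_left (show (1:Int) ≤ o by omega) (show (0:Int) ≤ e + 1 by omega)]

-- the timbered count is monotone in the day
lemma pv_ctt_mono (p1 o1 p2 o2 d d' : Int) (hp1 : 0 ≤ p1) (hp2 : 0 ≤ p2)
    (ho1 : o1 ≠ 0) (ho2 : o2 ≠ 0) (h : d ≤ d') :
    count_trees_timbered p1 o1 p2 o2 d ≤ count_trees_timbered p1 o1 p2 o2 d' := by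
  unfold count_trees_timbered
  have h1 := pv_work_mono o1 d d' ho1 h
  have h2 := pv_work_mono o2 d d' ho2 h
  have := mul_le_mul_of_nonneg_left h1 hp1
  have := mul_le_mul_of_nonneg_left h2 hp2
  omega

-- characterisation of B's forward scan: first hit in [day, day+fuel), else day+fuel
lemma pv_scan_char (p1 o1 p2 o2 n hi : Int) :
    ∀ (f : Nat) (day : Int), 0 ≤ day → day + f = hi →
      0 ≤ pvScan p1 o1 p2 o2 n day f ∧
      day ≤ pvScan p1 o1 p2 o2 n day f ∧
      pvScan p1 o1 p2 o2 n day f ≤ hi ∧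
      (∀ e, day ≤ e → e < pvScan p1 o1 p2 o2 n day f →
        count_trees_timbered p1 o1 p2 o2 e < n) ∧
      (pvScan p1 o1 p2 o2 n day f < hi →
        n ≤ count_trees_timbered p1 o1 p2 o2 (pvScan p1 o1 p2 o2 n day f)) := by
  intro f
  induction f with
  | zero =>
      intro day hd0 hdf
      simp only [pvScan]
      refine ⟨hd0, le_refl _, by omega, by intro e he1 he2; omega, by omega⟩
  | succ f ih =>
      intro day hd0 hdf
      simp only [pvScan]
      split_ifs with hc
      · exact ⟨hd0, le_refl _, by omega, by intro e he1 he2; omega,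
          fun _ => by unfold count_trees_timbered; omega⟩
      · obtain ⟨s0, s1, s2, s3, s4⟩ := ih (day + 1) (by omega) (by push_cast at hdf ⊢; omega)
        refine ⟨s0, by omega, s2, ?_, s4⟩
        intro e he1 he2
        rcases (by omega : e = day ∨ day + 1 ≤ e) with h | h
        · subst h; unfold count_trees_timbered; omega
        · exact s3 e h he2
  
-- characterisation of A's bisection under monotonicity: same first-hit property
lemma pv_bsearch_char (p1 o1 p2 o2 n : Int)
    (hF : ∀ e m : Int, 0 ≤ e → e ≤ m → count_trees_timbered p1 o1 p2 o2 m < n →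
      count_trees_timbered p1 o1 p2 o2 e < n) :
    ∀ (k : Nat) (l r : Int), (r - l).toNat = k → 0 ≤ l → l ≤ r → r ≤ 2 * n →
      (∀ e, 0 ≤ e → e < l → count_trees_timbered p1 o1 p2 o2 e < n) →
      (r < 2 * n → n ≤ count_trees_timbered p1 o1 p2 o2 r) →
      l ≤ pvBsearch p1 o1 p2 o2 n l r ∧
      pvBsearch p1 o1 p2 o2 n l r ≤ r ∧
      (∀ e, 0 ≤ e → e < pvBsearch p1 o1 p2 o2 n l r →
        count_trees_timbered p1 o1 p2 o2 e < n) ∧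
      (pvBsearch p1 o1 p2 o2 n l r < 2 * n →
        n ≤ count_trees_timbered p1 o1 p2 o2 (pvBsearch p1 o1 p2 o2 n l r)) := by
  intro k
  induction k using Nat.strong_induction_on with
  | _ k ih =>
      intro l r hk hl0 hlr hr2n hleft hright
      rw [pvBsearch]
      simp only [ge_iff_le]
      split_ifs with hlt hhit
      · have hmid := PySem.Int.floordiv_two_mid_bounds (le_of_lt hlt) (lo := l) (hi := r)
        have hmlt : PySem.Int.floordiv (l + r) 2 < r := by
          rw [PySem.Int.floordiv_lt_iff_lt_mul (by omega : (0:Int) < 2)]; omega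
        obtain ⟨s1, s2, s3, s4⟩ := ih (PySem.Int.floordiv (l + r) 2 - l).toNat (by omega)
          l _ rfl hl0 (by omega) (by omega) hleft (fun _ => hhit)
        exact ⟨s1, by omega, s3, s4⟩
      · have hmid := PySem.Int.floordiv_two_mid_bounds (le_of_lt hlt) (lo := l) (hi := r)
        have hmlt : PySem.Int.floordiv (l + r) 2 < r := by
          rw [PySem.Int.floordiv_lt_iff_lt_mul (by omega : (0:Int) < 2)]; omega
        have hstep := ih (r - (PySem.Int.floordiv (l + r) 2 + 1)).toNat (by omega)
          (PySem.Int.floordiv (l + r) 2 + 1) r rfl (by omega) (by omega) hr2n ?_ hright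
        · obtain ⟨s1, s2, s3, s4⟩ := hstep
          exact ⟨by omega, s2, s3, s4⟩
        · intro e he0 hem
          rcases (by omega : e < l ∨ l ≤ e) with h | h
          · exact hleft e he0 h
          · exact hF e (PySem.Int.floordiv (l + r) 2) he0 (by omega) (by omega)
      · have hlr' : l = r := by omega
        subst hlr'
        exact ⟨le_refl _, le_refl _, hleft, fun h => hright h⟩

-- ===== VERDICT (by name: the statement is the Claim_ definition above) =====
theorem count_days_to_work_spec : Claim_equal_count_days_to_work := by
  intro p1 o1 p2 o2 n _ hpre
  unfold Spec_count_days_to_work count_days_to_work count_days_to_work_alt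
  by_cases hn : n ≤ 0
  · rw [pvBsearch]
    simp only [if_pos hn]
    rw [dif_neg (by omega : ¬ (0:Int) < 2 * n)]
  · have hn1 : 1 ≤ n := by omega
    obtain ⟨ho1, ho2, hps⟩ : o1 ≠ 0 ∧ o2 ≠ 0 ∧
        ((0 ≤ p1 ∧ 0 ≤ p2) ∨ (p1 ≤ 0 ∧ p2 ≤ 0)) := by
      rcases hpre with h | h
      · omega
      · exact h
    have hF : ∀ e m : Int, 0 ≤ e → e ≤ m → count_trees_timbered p1 o1 p2 o2 m < n →
        count_trees_timbered p1 o1 p2 o2 e < n := by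
      rcases hps with ⟨hp1, hp2⟩ | ⟨hp1, hp2⟩
      · intro e m he hem hm
        have := pv_ctt_mono p1 o1 p2 o2 e m hp1 hp2 ho1 ho2 hem
        omega
      · intro e m he _ _
        have g1 := pv_work_nonneg o1 e ho1 he
        have g2 := pv_work_nonneg o2 e ho2 he
        have t1 : p1 * (e - PySem.Int.floordiv e o1) ≤ 0 :=
          mul_nonpos_of_nonpos_of_nonneg hp1 g1
        have t2 : p2 * (e - PySem.Int.floordiv e o2) ≤ 0 :=
          mul_nonpos_of_nonpos_of_nonneg hp2 g2
        unfold count_trees_timbered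
        omega
    rw [if_neg hn]
    obtain ⟨a1, a2, a3, a4⟩ := pv_bsearch_char p1 o1 p2 o2 n hF
      (2 * n - 0).toNat 0 (2 * n) rfl (le_refl _) (by omega) (le_refl _)
      (by intro e he0 he; omega) (by intro h; omega)
    obtain ⟨b0, b1, b2, b3, b4⟩ := pv_scan_char p1 o1 p2 o2 n (2 * n)
      (2 * n).toNat 0 (le_refl _) (by omega)
    set L := pvBsearch p1 o1 p2 o2 n 0 (2 * n)
    set S := pvScan p1 o1 p2 o2 n 0 (2 * n).toNat
    rcases lt_trichotomy L S with h | h | h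
    · have hLlt : L < 2 * n := by omega
      have := a4 hLlt
      have := b3 L (by omega) h
      omega
    · exact h
    · have hSlt : S < 2 * n := by omega
      have := b4 hSlt
      have := a3 S (by omega) h
      omega
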